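-- pv_equiv track=rewrite | github.com/djclayton21/practical-python | Practice/censor_dispenser/censor_dispenser.py | positivify
-- ===== SOURCE A (Python) =====
-- def positivify(text, phrases):
--     # replace phrase after second occurrence
--     negative_count = 0
--     words = text.split(" ")
--     for i, word in enumerate(words):
--         screen = "!" * len(word)
--         if word.lower() in phrases:
--             if negative_count >= 2:
--                 words[i] = screen
--             else:
--                 negative_count += 1
--     text = " ".join(words)
--     return text
-- ===== SOURCE B (Python) =====
-- def positivify(text, phrases):
--     words = text.split(" ")
--     total = sum(1 for w in words if w.lower() in phrases)
--     to_censor = max(total - 2, 0)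
--     out = []
--     for w in reversed(words):
--         if to_censor > 0 and w.lower() in phrases:
--             out.append("!" * len(w))
--             to_censor -= 1
--         else:
--             out.append(w)
--     return " ".join(reversed(out))
-- ===== Notes on version B (the rewrite author's own statement) =====
-- stated objective: alternative
-- what changed: Instead of A's left-to-right scan with a running occurrence counter, B first counts all matches, then walks the words right-to-left with a censor budget of total-2, censoring the last total-2 matches (the same set as all matches after the second) and building the output back-to-front.
import Mathlib
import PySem

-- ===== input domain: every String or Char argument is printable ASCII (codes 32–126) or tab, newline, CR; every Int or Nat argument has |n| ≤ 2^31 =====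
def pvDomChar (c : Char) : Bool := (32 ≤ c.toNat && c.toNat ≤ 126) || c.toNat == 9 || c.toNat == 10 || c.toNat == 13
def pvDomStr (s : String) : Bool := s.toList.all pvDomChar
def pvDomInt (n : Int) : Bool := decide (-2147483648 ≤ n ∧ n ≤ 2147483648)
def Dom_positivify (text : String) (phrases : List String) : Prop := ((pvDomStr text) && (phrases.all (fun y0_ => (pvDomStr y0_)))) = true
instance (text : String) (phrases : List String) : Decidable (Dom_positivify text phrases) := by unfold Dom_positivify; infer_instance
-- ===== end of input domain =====

-- B replaces A's forward scan with a running counter by a count pass plus a right-to-left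
-- traversal with a censor budget of total-2, censoring the last total-2 matches; objective: alternative.

-- ===== PORT A =====
-- screen = "!" * len(word)  (exact: len(word) copies of '!')
def pvScreen (w : String) : String := String.ofList (List.replicate w.toList.length '!')

-- the for-loop of A: state = (words, negative_count); writes land only at already-visited
-- indices, so enumerate reads the original list's words
def pvLoopA (phrases : List String) : List (Int × String) → List String → Int → List String × Int
  | [], ws, c => (ws, c)
  | (i, word) :: rest, ws, c =>
    if phrases.contains (PySem.Str.lower word) then
      if 2 ≤ c then pvLoopA phrases rest (PySem.List.pySetD ws i (pvScreen word)) c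
      else pvLoopA phrases rest ws (c + 1)
    else pvLoopA phrases rest ws c

def positivify (text : String) (phrases : List String) : String :=
  -- text.split(" "): the separator is the non-empty literal " ", so split? is always some
  let words := (PySem.Str.split? text " ").getD []
  PySem.Str.join " " (pvLoopA phrases (PySem.List.enumerate words 0) words 0).1

-- ===== PORT B =====
-- "!" * len(w)
def pvBang (w : String) : String := String.ofList (List.replicate w.toList.length '!')

def positivify_alt (text : String) (phrases : List String) : String :=
  -- text.split(" "): the separator is the non-empty literal " ", so split? is always some
  let words := (PySem.Str.split? text " ").getD []
  -- total = sum(1 for w in words if w.lower() in phrases)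
  let total : Int := (words.filter (fun w => phrases.contains (PySem.Str.lower w))).length
  -- to_censor = max(total - 2, 0); loop over reversed(words) appending to out
  let res := words.reverse.foldl
    (fun (st : List String × Int) w =>
      if 0 < st.2 ∧ phrases.contains (PySem.Str.lower w) then (st.1 ++ [pvBang w], st.2 - 1)
      else (st.1 ++ [w], st.2))
    ([], max (total - 2) 0)
  PySem.Str.join " " res.1.reverse

-- ===== PRECONDITION & SPEC =====
def Spec_positivify (text : String) (phrases : List String) (out : String) : Prop := out = positivify_alt text phrases
instance (text : String) (phrases : List String) (out : String) : Decidable (Spec_positivify text phrases out) := by unfold Spec_positivify; infer_instance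

-- ===== CLAIM (what is proved, stated in full; the proofs are below) =====
def Claim_equal_positivify : Prop := ∀ (text : String) (phrases : List String), Dom_positivify text phrases → Spec_positivify text phrases (positivify text phrases)

-- ===== LEMMAS AND PROOFS =====

-- common pure recursion: k = how many matches may still pass uncensored (A's view)
def pvGo (phrases : List String) : List String → Nat → List String
  | [], _ => []
  | w :: ws, k =>
    if phrases.contains (PySem.Str.lower w) then
      (if k = 0 then pvScreen w else w) :: pvGo phrases ws (k - 1)
    else w :: pvGo phrases ws k

-- B's right-to-left traversal as a pure recursion: processes ws right-to-left with budget t,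
-- returns (censored list, remaining budget)
def pvG (phrases : List String) : List String → Int → List String × Int
  | [], t => ([], t)
  | w :: ws, t =>
    let r := pvG phrases ws t
    if 0 < r.2 ∧ phrases.contains (PySem.Str.lower w) then (pvBang w :: r.1, r.2 - 1)
    else (w :: r.1, r.2)

def pvCount (phrases : List String) (ws : List String) : Nat :=
  (ws.filter (fun w => phrases.contains (PySem.Str.lower w))).length

lemma pv_set_append {α : Type} (pre : List α) (w x : α) (ws : List α) :
    (pre ++ w :: ws).set pre.length x = pre ++ x :: ws := by
  induction pre with
  | nil => rfl
  | cons a pre ih => simp [ih]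

lemma pvLoopA_go (phrases : List String) (ws : List String) :
    ∀ (pre : List String) (c : Int) (k : Nat), (k : Int) = 2 - c →
      (pvLoopA phrases (PySem.List.enumerate ws (pre.length : Int)) (pre ++ ws) c).1
        = pre ++ pvGo phrases ws k := by
  induction ws with
  | nil => intro pre c k hk; simp [PySem.List.enumerate_nil, pvLoopA, pvGo]
  | cons w ws ih =>
    intro pre c k hk
    rw [PySem.List.enumerate_cons]
    have h1 : ∀ x : String, ((pre.length : Int) + 1) = (((pre ++ [x]).length : Nat) : Int) := by
      intro x; simp
    by_cases hm : phrases.contains (PySem.Str.lower w)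
    · by_cases hc : 2 ≤ c
      · have hk0 : k = 0 := by omega
        subst hk0
        rw [pvLoopA, if_pos hm, if_pos hc, PySem.List.pySetD_natCast, pv_set_append,
          h1 (pvScreen w), show pre ++ pvScreen w :: ws = (pre ++ [pvScreen w]) ++ ws by simp,
          ih (pre ++ [pvScreen w]) c 0 hk]
        simp only [pvGo]
        rw [if_pos hm]
        simp
      · have hk0 : k ≠ 0 := by omega
        rw [pvLoopA, if_pos hm, if_neg hc, h1 w,
          show pre ++ w :: ws = (pre ++ [w]) ++ ws by simp,
          ih (pre ++ [w]) (c + 1) (k - 1) (by omega)]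
        simp only [pvGo]
        rw [if_pos hm, if_neg hk0]
        simp
    · rw [pvLoopA, if_neg hm, h1 w,
        show pre ++ w :: ws = (pre ++ [w]) ++ ws by simp, ih (pre ++ [w]) c k hk]
      simp only [pvGo]
      rw [if_neg hm]
      simp

-- B's foldl over the reversed list computes pvG (output accumulated back-to-front)
lemma pvFoldB_g (phrases : List String) (ws : List String) :
    ∀ (out : List String) (t : Int),
      ws.reverse.foldl
        (fun (st : List String × Int) w =>
          if 0 < st.2 ∧ phrases.contains (PySem.Str.lower w) then (st.1 ++ [pvBang w], st.2 - 1)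
          else (st.1 ++ [w], st.2)) (out, t)
        = (out ++ (pvG phrases ws t).1.reverse, (pvG phrases ws t).2) := by
  induction ws with
  | nil => intro out t; simp [pvG]
  | cons w ws ih =>
    intro out t
    rw [List.reverse_cons, List.foldl_append, ih out t]
    simp only [pvG, List.foldl_cons, List.foldl_nil]
    by_cases hc : 0 < (pvG phrases ws t).2 ∧ phrases.contains (PySem.Str.lower w)
    · rw [if_pos hc, if_pos hc]; simp
    · rw [if_neg hc, if_neg hc]; simp

-- pvG with budget n censors the last min(count, n) matches = skips the first count ∸ n
lemma pvG_eq_go (phrases : List String) (ws : List String) :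
    ∀ (n : Nat),
      pvG phrases ws (n : Int)
        = (pvGo phrases ws (pvCount phrases ws - n), ((n - pvCount phrases ws : Nat) : Int)) := by
  induction ws with
  | nil => intro n; simp [pvG, pvGo, pvCount]
  | cons w ws ih =>
    intro n
    by_cases hm : phrases.contains (PySem.Str.lower w)
    · have hcnt : pvCount phrases (w :: ws) = pvCount phrases ws + 1 := by
        simp [pvCount, show PySem.Str.lower w ∈ phrases by simpa using hm]
      by_cases hn : pvCount phrases ws < n
      · have h2 : (0 : Int) < ((n - pvCount phrases ws : Nat) : Int) := by
          have : 0 < n - pvCount phrases ws := by omega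
          exact_mod_cast this
        rw [pvG, ih n]
        simp only
        rw [if_pos ⟨h2, hm⟩]
        have : ((n - pvCount phrases ws : Nat) : Int) - 1
            = ((n - pvCount phrases (w :: ws) : Nat) : Int) := by
          rw [hcnt]; omega
        rw [this]
        simp only [pvGo]
        rw [if_pos hm, if_pos (by omega : pvCount phrases (w :: ws) - n = 0)]
        have hgo : pvCount phrases ws - n = pvCount phrases (w :: ws) - n - 1 := by omega
        rw [← hgo]
        simp [pvBang, pvScreen]
      · have h2 : ¬ (0 : Int) < ((n - pvCount phrases ws : Nat) : Int) := by
          have : n - pvCount phrases ws = 0 := by omega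
          rw [this]; norm_num
        rw [pvG, ih n]
        simp only
        rw [if_neg (by tauto : ¬ (0 < ((n - pvCount phrases ws : Nat) : Int) ∧ phrases.contains (PySem.Str.lower w)))]
        simp only [pvGo]
        rw [if_pos hm, if_neg (by omega : ¬ pvCount phrases (w :: ws) - n = 0)]
        have hgo : pvCount phrases ws - n = pvCount phrases (w :: ws) - n - 1 := by omega
        have hsnd : n - pvCount phrases ws = n - pvCount phrases (w :: ws) := by omega
        rw [← hgo, hsnd]
    · have hcnt : pvCount phrases (w :: ws) = pvCount phrases ws := by
        simp [pvCount, show PySem.Str.lower w ∉ phrases by simpa using hm]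
      rw [pvG, ih n]
      simp only
      rw [if_neg (by tauto : ¬ (0 < ((n - pvCount phrases ws : Nat) : Int) ∧ phrases.contains (PySem.Str.lower w)))]
      simp only [pvGo]
      rw [if_neg hm, hcnt]

-- pvGo only ever uses min(count, k) of its skip allowance
lemma pvGo_min (phrases : List String) (ws : List String) :
    ∀ (k : Nat), pvGo phrases ws k = pvGo phrases ws (min (pvCount phrases ws) k) := by
  induction ws with
  | nil => intro k; simp [pvGo]
  | cons w ws ih =>
    intro k
    by_cases hm : phrases.contains (PySem.Str.lower w)
    · have hcnt : pvCount phrases (w :: ws) = pvCount phrases ws + 1 := by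
        simp [pvCount, show PySem.Str.lower w ∈ phrases by simpa using hm]
      simp only [pvGo, hm, if_true, hcnt]
      congr 1
      · by_cases hk : k = 0
        · rw [if_pos hk, if_pos (by omega)]
        · rw [if_neg hk, if_neg (by omega)]
      · rw [ih (k - 1), ih (min (pvCount phrases ws + 1) k - 1)]
        congr 1
        omega
    · have hcnt : pvCount phrases (w :: ws) = pvCount phrases ws := by
        simp [pvCount, show PySem.Str.lower w ∉ phrases by simpa using hm]
      simp only [pvGo, hm, hcnt]
      conv_lhs => rw [ih k]
      simp

-- ===== VERDICT (by name: the statement is the Claim_ definition above) =====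
theorem positivify_spec : Claim_equal_positivify := by
  intro text phrases _
  unfold Spec_positivify
  dsimp only [positivify, positivify_alt]
  set ws := (PySem.Str.split? text " ").getD [] with hws
  have hA := pvLoopA_go phrases ws [] 0 2 (by norm_num)
  simp only [List.nil_append, List.length_nil, Nat.cast_zero] at hA
  rw [hA]
  have htot : ((ws.filter (fun w => phrases.contains (PySem.Str.lower w))).length : Int)
      = (pvCount phrases ws : Int) := by rfl
  rw [htot]
  have hmax : max ((pvCount phrases ws : Int) - 2) 0
      = ((pvCount phrases ws - 2 : Nat) : Int) := by
    by_cases h : 2 ≤ pvCount phrases ws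
    · rw [Nat.cast_sub h]; omega
    · have h0 : pvCount phrases ws - 2 = 0 := by omega
      rw [h0]
      have : (pvCount phrases ws : Int) - 2 ≤ 0 := by omega
      simp
      omega
  rw [hmax, pvFoldB_g phrases ws [] ((pvCount phrases ws - 2 : Nat) : Int),
    pvG_eq_go phrases ws (pvCount phrases ws - 2)]
  simp only [List.nil_append, List.reverse_reverse]
  have hk : pvCount phrases ws - (pvCount phrases ws - 2) = min (pvCount phrases ws) 2 := by
    omega
  rw [hk, ← pvGo_min phrases ws 2]
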